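-- pv_equiv track=rewrite | github.com/981377660LMT/algorithm-study | 11_动态规划/dp分类/数位dp/结论/BitSequence.py | bitIndexPreSumFast
-- ===== SOURCE A (Python) =====
-- def bitIndexPreSumFast(bitIndex: int) -> int:
--     """BitSequence 闭区间`[0, bitIndex]`中所有数的之和."""
--     if bitIndex == 0:
--         return 0
--     res, n, preCount, preSum = 0, 0, 0, 0
--     for i in range((bitIndex + 1).bit_length() - 1, 0, -1):
--         c = (preCount << i) + (i << (i - 1))
--         if c <= bitIndex:
--             bitIndex -= c
--             res += (preSum << i) + ((i * (i - 1) // 2) << (i - 1))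
--             preSum += i
--             preCount += 1
--             n |= 1 << i
--     if preCount <= bitIndex:
--         bitIndex -= preCount
--         res += preSum
--         n += 1
--     for _ in range(bitIndex):
--         lowbit = n & -n
--         res += lowbit.bit_length() - 1
--         n ^= lowbit
--     return res
-- ===== SOURCE B (Python) =====
-- def bitIndexPreSumFast(bitIndex: int) -> int:
--     # Different algorithm: binary-search the number the bitIndex-th entry falls in,
--     # using a divide-and-conquer prefix count/sum of the bit sequence, then add the
--     # lowest set-bit positions of that number.
--     if bitIndex <= 0:
--         return 0
--     k = bitIndex
--
--     def counts(n):
--         # (popcount of n, sum of set-bit positions of n)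
--         c, s, j = 0, 0, 0
--         while n:
--             if n & 1:
--                 c += 1
--                 s += j
--             n >>= 1
--             j += 1
--         return c, s
--
--     def prefix(n):
--         # (number, sum) of bit-sequence entries contributed by 0, 1, ..., n-1
--         if n == 0:
--             return 0, 0
--         m, b = divmod(n, 2)
--         c, s = prefix(m)
--         cc = 2 * c + m
--         ss = 2 * s + 2 * c
--         if b:
--             pc, ps = counts(m)
--             cc += pc
--             ss += ps + pc
--         return cc, ss
--
--     lo, hi = 0, 1 << (k + 1).bit_length()
--     while hi - lo > 1:
--         mid = (lo + hi) // 2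
--         if prefix(mid)[0] <= k:
--             lo = mid
--         else:
--             hi = mid
--     c, s = prefix(lo)
--     res = s
--     t = k - c
--     for j in range(lo.bit_length()):
--         if t == 0:
--             break
--         if (lo >> j) & 1:
--             res += j
--             t -= 1
--     return res
-- ===== Notes on version B (the rewrite author's own statement) =====
-- stated objective: alternative
-- what changed: A's single top-down greedy pass that assembles the target number bit by bit while maintaining incremental preCount/preSum block counters is replaced by a binary search for the number containing entry bitIndex, with the prefix entry count/sum computed by an independent divide-and-conquer recursion on halves, plus a low-bit scan for the partial number.
import Mathlib
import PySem

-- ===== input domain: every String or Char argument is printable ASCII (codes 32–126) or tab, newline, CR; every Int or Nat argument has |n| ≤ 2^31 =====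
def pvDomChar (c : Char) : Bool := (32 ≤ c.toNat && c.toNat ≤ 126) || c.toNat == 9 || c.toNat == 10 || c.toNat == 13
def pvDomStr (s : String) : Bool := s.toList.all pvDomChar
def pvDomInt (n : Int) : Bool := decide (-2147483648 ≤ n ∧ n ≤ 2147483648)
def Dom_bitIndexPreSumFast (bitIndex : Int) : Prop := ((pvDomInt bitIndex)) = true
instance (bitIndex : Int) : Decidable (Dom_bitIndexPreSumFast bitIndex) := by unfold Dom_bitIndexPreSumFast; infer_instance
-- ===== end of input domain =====

-- B re-implements bitIndexPreSumFast by a different algorithm — binary search for the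
-- number holding entry `bitIndex` plus a divide-and-conquer prefix count/sum — instead of
-- A's one-pass top-down greedy; the theorem below proves both return the same value on
-- every Int input (no speed claim: A is already sub-linear).
-- ===== PORT A =====
-- Transliteration of A: top-down greedy over bit positions, then a lowbit tail loop.
def pvLoopTail (st : Int × Int) (_ : Int) : Int × Int :=
  let (res, n) := st
  let lowbit := PySem.Int.band n (-n)
  (res + ((PySem.Int.bitLength lowbit : Int) - 1), PySem.Int.bxor n lowbit)

def pvLoopMain (st : Int × Int × Int × Int × Int) (i : Int) : Int × Int × Int × Int × Int :=
  let (bi, res, n, preCount, preSum) := st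
  let c := (preCount <<< i.toNat) + (i <<< (i - 1).toNat)
  if c ≤ bi then
    (bi - c,
     res + (preSum <<< i.toNat) + ((PySem.Int.floordiv (i * (i - 1)) 2) <<< (i - 1).toNat),
     PySem.Int.bor n (1 <<< i.toNat),
     preCount + 1,
     preSum + i)
  else st

def bitIndexPreSumFast (bitIndex : Int) : Int :=
  if bitIndex == 0 then 0
  else
    let st := (PySem.List.pyRange ((PySem.Int.bitLength (bitIndex + 1) : Int) - 1) 0 (-1)).foldl
                pvLoopMain (bitIndex, 0, 0, 0, 0)
    let (bi, res, n, preCount, preSum) := st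
    let (bi, res, n) :=
      if preCount ≤ bi then (bi - preCount, res + preSum, n + 1) else (bi, res, n)
    let (res, _) := (PySem.List.pyRange 0 bi 1).foldl pvLoopTail (res, n)
    res

-- ===== PORT B =====
-- Transliteration of B: binary-search the number holding entry `bitIndex`, with a
-- divide-and-conquer prefix count/sum, then add that number's lowest set-bit positions.
-- (The helper recursions are guarded by `0 < n` / `1 < hi - lo`: on the nonnegative
-- values they receive this is exactly Python's `while n:` / `while hi - lo > 1:`.)
lemma pvShiftHalf_lt (n : Int) (h : 0 < n) : (n >>> 1).toNat < n.toNat := by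
  have e : n = ((n.toNat : Nat) : Int) := by omega
  rw [e, show ((n.toNat : Nat) : Int) >>> 1 = ((n.toNat >>> 1 : Nat) : Int) from rfl]
  have h2 : n.toNat >>> 1 = n.toNat / 2 := by
    have := Nat.shiftRight_succ n.toNat 0
    simpa using this
  rw [h2]
  omega

lemma pvFloordivHalf_lt (n : Int) (h : 0 < n) : (PySem.Int.floordiv n 2).toNat < n.toNat := by
  rw [PySem.Int.floordiv_eq_ediv_of_pos (by norm_num)]
  omega

def pvCountsB (n c s j : Int) : Int × Int :=
  if h : 0 < n then
    let cs := if PySem.Int.band n 1 == 1 then (c + 1, s + j) else (c, s)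
    pvCountsB (n >>> 1) cs.1 cs.2 (j + 1)
  else (c, s)
termination_by n.toNat
decreasing_by exact pvShiftHalf_lt n h

def pvPrefixB (n : Int) : Int × Int :=
  if h : 0 < n then
    let m := PySem.Int.floordiv n 2
    let b := PySem.Int.mod n 2
    let cs := pvPrefixB m
    let cc := 2 * cs.1 + m
    let ss := 2 * cs.2 + 2 * cs.1
    if b == 1 then
      let pcps := pvCountsB m 0 0 0
      (cc + pcps.1, ss + (pcps.2 + pcps.1))
    else (cc, ss)
  else (0, 0)
termination_by n.toNat
decreasing_by exact pvFloordivHalf_lt n h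

def pvSearchB (k lo hi : Int) : Int :=
  if h : 1 < hi - lo then
    let mid := PySem.Int.floordiv (lo + hi) 2
    if (pvPrefixB mid).1 ≤ k then pvSearchB k mid hi else pvSearchB k lo mid
  else lo
termination_by (hi - lo).toNat
decreasing_by
  · simp only [mid, PySem.Int.floordiv_eq_ediv_of_pos (show (0:Int) < 2 by norm_num)]
    omega
  · simp only [mid, PySem.Int.floordiv_eq_ediv_of_pos (show (0:Int) < 2 by norm_num)]
    omega

def pvTailB (lo : Int) (js : List Int) (res t : Int) : Int :=
  match js with
  | [] => res
  | j :: rest =>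
    if t == 0 then res
    else if PySem.Int.band (lo >>> j.toNat) 1 == 1 then pvTailB lo rest (res + j) (t - 1)
    else pvTailB lo rest res t

def bitIndexPreSumFast_alt (bitIndex : Int) : Int :=
  if bitIndex ≤ 0 then 0
  else
    let k := bitIndex
    let lo := pvSearchB k 0 ((1 : Int) <<< PySem.Int.bitLength (k + 1))
    let cs := pvPrefixB lo
    pvTailB lo (PySem.List.pyRange 0 (PySem.Int.bitLength lo : Int) 1) cs.2 (k - cs.1)

-- ===== PRECONDITION & SPEC =====
def Spec_bitIndexPreSumFast (bitIndex : Int) (out : Int) : Prop := out = bitIndexPreSumFast_alt bitIndex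
instance (bitIndex : Int) (out : Int) : Decidable (Spec_bitIndexPreSumFast bitIndex out) := by unfold Spec_bitIndexPreSumFast; infer_instance

-- ===== CLAIM (what is proved, stated in full; the proofs are below) =====
def Claim_equal_bitIndexPreSumFast : Prop := ∀ (bitIndex : Int), Dom_bitIndexPreSumFast bitIndex → Spec_bitIndexPreSumFast bitIndex (bitIndexPreSumFast bitIndex)

-- ===== LEMMAS AND PROOFS =====

-- ---- spec-side definitions: the bit sequence ----
-- ebits n = positions of the set bits of n, lowest first
def ebits (n : Nat) : List Nat :=
  if h : n = 0 then [] else (if n % 2 = 1 then [0] else []) ++ (ebits (n / 2)).map (· + 1)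
decreasing_by exact Nat.div_lt_self (Nat.pos_of_ne_zero h) one_lt_two

def pcN (n : Nat) : Nat := (ebits n).length   -- popcount
def psN (n : Nat) : Nat := (ebits n).sum      -- sum of set-bit positions
def prefN (n : Nat) : List Nat := (List.range n).flatMap ebits
def CnN (n : Nat) : Nat := (prefN n).length
def SnN (n : Nat) : Nat := (prefN n).sum
def BspecN (k : Nat) : Nat := ((prefN (k + 1)).take k).sum
def lbN (m : Nat) : Nat := m - (m &&& (m - 1))

-- ---- basic ebits lemmas ----
lemma ebits_zero : ebits 0 = [] := by simp [ebits]

lemma ebits_pos (n : Nat) (h : n ≠ 0) :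
    ebits n = (if n % 2 = 1 then [0] else []) ++ (ebits (n / 2)).map (· + 1) := by
  conv_lhs => rw [ebits]
  simp [h]

lemma ebits_two_mul (x : Nat) : ebits (2 * x) = (ebits x).map (· + 1) := by
  rcases Nat.eq_zero_or_pos x with rfl | hx
  · simp [ebits]
  · rw [ebits_pos _ (by omega)]
    have h1 : 2 * x % 2 = 0 := by omega
    have h2 : 2 * x / 2 = x := by omega
    simp [h1, h2]

lemma ebits_odd (x : Nat) : ebits (2 * x + 1) = 0 :: (ebits x).map (· + 1) := by
  rw [ebits_pos _ (by omega)]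
  have h1 : (2 * x + 1) % 2 = 1 := by omega
  have h2 : (2 * x + 1) / 2 = x := by omega
  simp [h1, h2]

lemma pcN_zero : pcN 0 = 0 := by simp [pcN, ebits_zero]
lemma psN_zero : psN 0 = 0 := by simp [psN, ebits_zero]
lemma pcN_two_mul (x : Nat) : pcN (2 * x) = pcN x := by simp [pcN, ebits_two_mul]
lemma pcN_odd (x : Nat) : pcN (2 * x + 1) = pcN x + 1 := by simp [pcN, ebits_odd]
lemma psN_two_mul (x : Nat) : psN (2 * x) = psN x + pcN x := by
  simp [psN, pcN, ebits_two_mul]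
lemma psN_odd (x : Nat) : psN (2 * x + 1) = psN x + pcN x := by
  simp [psN, pcN, ebits_odd]

lemma pcN_one : pcN 1 = 1 := by
  have := pcN_odd 0; simpa [pcN_zero] using this
lemma psN_one : psN 1 = 0 := by
  have := psN_odd 0; simp [psN_zero, pcN_zero] at this; simpa using this

-- ---- split over disjoint bit ranges ----
lemma split_pc_ps : ∀ (i a b : Nat), b < 2 ^ i →
    pcN (2 ^ i * a + b) = pcN a + pcN b ∧ psN (2 ^ i * a + b) = psN a + i * pcN a + psN b := by
  intro i
  induction i with
  | zero =>
    intro a b hb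
    have hb0 : b = 0 := by omega
    subst hb0
    simp [pcN_zero, psN_zero]
  | succ i ih =>
    intro a b hb
    obtain ⟨c, rfl | rfl⟩ := Nat.even_or_odd' b
    · have hc : c < 2 ^ i := by
        have : (2:Nat) ^ (i+1) = 2 * 2 ^ i := by ring
        omega
      have he : 2 ^ (i + 1) * a + 2 * c = 2 * (2 ^ i * a + c) := by ring
      obtain ⟨h1, h2⟩ := ih a c hc
      rw [he, pcN_two_mul, psN_two_mul, pcN_two_mul, psN_two_mul, h1, h2]
      constructor
      · rfl
      · ring
    · have hc : c < 2 ^ i := by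
        have : (2:Nat) ^ (i+1) = 2 * 2 ^ i := by ring
        omega
      have he : 2 ^ (i + 1) * a + (2 * c + 1) = 2 * (2 ^ i * a + c) + 1 := by ring
      obtain ⟨h1, h2⟩ := ih a c hc
      rw [he, pcN_odd, psN_odd, pcN_odd, psN_odd, h1, h2]
      constructor
      · omega
      · ring

lemma pcN_pow (i : Nat) : pcN (2 ^ i) = 1 := by
  have h := (split_pc_ps i 1 0 (by positivity)).1
  simpa [pcN_zero, pcN_one] using h

lemma psN_pow (i : Nat) : psN (2 ^ i) = i := by
  have h := (split_pc_ps i 1 0 (by positivity)).2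
  simpa [psN_zero, psN_one, pcN_one] using h

lemma pcN_pos : ∀ n, 0 < n → 0 < pcN n := by
  intro n
  induction n using Nat.strong_induction_on with
  | _ n ih =>
    intro hn
    obtain ⟨c, rfl | rfl⟩ := Nat.even_or_odd' n
    · rw [pcN_two_mul]
      exact ih c (by omega) (by omega)
    · rw [pcN_odd]; omega

-- ---- cumulative count / sum ----
lemma prefN_succ (n : Nat) : prefN (n + 1) = prefN n ++ ebits n := by
  simp [prefN, List.range_succ]
lemma CnN_zero : CnN 0 = 0 := by simp [CnN, prefN]
lemma SnN_zero : SnN 0 = 0 := by simp [SnN, prefN]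
lemma CnN_succ (n : Nat) : CnN (n + 1) = CnN n + pcN n := by
  simp [CnN, prefN_succ, pcN]
lemma SnN_succ (n : Nat) : SnN (n + 1) = SnN n + psN n := by
  simp [SnN, prefN_succ, psN]

lemma le_CnN_succ : ∀ n, n ≤ CnN n + 1 := by
  intro n
  induction n with
  | zero => omega
  | succ n ih =>
    rw [CnN_succ]
    rcases Nat.eq_zero_or_pos n with rfl | hn
    · simp [CnN_zero]
    · have := pcN_pos n hn; omega

lemma sum_map_const_nat {α : Type} (l : List α) (c : Nat) :
    (l.map fun _ => c).sum = l.length * c := by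
  induction l with
  | nil => simp
  | cons a tl ih =>
    rw [List.map_cons, List.sum_cons, ih, List.length_cons]
    ring

lemma sum_flatMap_nat {α : Type} (l : List α) (f : α → List Nat) :
    (l.flatMap f).sum = (l.map fun x => (f x).sum).sum := by
  induction l with
  | nil => simp
  | cons a tl ih => simp [ih]

lemma CnN_as_sum (n : Nat) : CnN n = ((List.range n).map pcN).sum := by
  simp only [CnN, prefN, List.length_flatMap]
  rfl
lemma SnN_as_sum (n : Nat) : SnN n = ((List.range n).map psN).sum := by
  simp only [SnN, prefN, sum_flatMap_nat]
  rfl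

lemma Cn_Sn_block (i n : Nat) (h : 2 ^ i ∣ n) :
    CnN (n + 2 ^ i) = CnN n + 2 ^ i * pcN n + CnN (2 ^ i) ∧
    SnN (n + 2 ^ i) = SnN n + 2 ^ i * psN n + SnN (2 ^ i) := by
  obtain ⟨a, rfl⟩ := h
  have hpc : ∀ b, b < 2 ^ i → pcN (2 ^ i * a + b) = pcN (2 ^ i * a) + pcN b := by
    intro b hb
    have h0 := (split_pc_ps i a 0 (by positivity)).1
    have h1 := (split_pc_ps i a b hb).1
    simp [pcN_zero] at h0
    omega
  have hps : ∀ b, b < 2 ^ i → psN (2 ^ i * a + b) = psN (2 ^ i * a) + psN b := by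
    intro b hb
    have h0 := (split_pc_ps i a 0 (by positivity)).2
    have h1 := (split_pc_ps i a b hb).2
    simp [psN_zero] at h0
    omega
  constructor
  · rw [CnN_as_sum, CnN_as_sum, CnN_as_sum, List.range_add, List.map_append, List.sum_append,
      List.map_map]
    have : ((List.range (2 ^ i)).map (pcN ∘ fun x => 2 ^ i * a + x)).sum
        = ((List.range (2 ^ i)).map fun b => pcN (2 ^ i * a) + pcN b).sum := by
      apply congrArg
      apply List.map_congr_left
      intro b hb
      simp only [Function.comp]
      exact hpc b (List.mem_range.mp hb)
    rw [this, List.sum_map_add, sum_map_const_nat]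
    simp [List.length_range]
    ring
  · rw [SnN_as_sum, SnN_as_sum, SnN_as_sum, List.range_add, List.map_append, List.sum_append,
      List.map_map]
    have : ((List.range (2 ^ i)).map (psN ∘ fun x => 2 ^ i * a + x)).sum
        = ((List.range (2 ^ i)).map fun b => psN (2 ^ i * a) + psN b).sum := by
      apply congrArg
      apply List.map_congr_left
      intro b hb
      simp only [Function.comp]
      exact hps b (List.mem_range.mp hb)
    rw [this, List.sum_map_add, sum_map_const_nat]
    simp [List.length_range]
    ring

lemma CnN_one : CnN 1 = 0 := by
  have := CnN_succ 0; simp [CnN_zero, pcN_zero] at this; simpa using this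
lemma SnN_one : SnN 1 = 0 := by
  have := SnN_succ 0; simp [SnN_zero, psN_zero] at this; simpa using this

lemma Cn_pow (i : Nat) : 2 * CnN (2 ^ i) = i * 2 ^ i := by
  induction i with
  | zero => simp [CnN_one]
  | succ i ih =>
    have hb := (Cn_Sn_block i (2 ^ i) dvd_rfl).1
    have he : (2:Nat) ^ i + 2 ^ i = 2 ^ (i + 1) := by ring
    rw [he] at hb
    rw [hb, pcN_pow]
    have hx : (i + 1) * 2 ^ (i + 1) = 2 * (i * 2 ^ i) + 2 * 2 ^ i := by ring
    rw [hx]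
    omega

lemma Sn_pow (i : Nat) : 4 * SnN (2 ^ i) = i * (i - 1) * 2 ^ i := by
  induction i with
  | zero => simp [SnN_one]
  | succ i ih =>
    have hb := (Cn_Sn_block i (2 ^ i) dvd_rfl).2
    have he : (2:Nat) ^ i + 2 ^ i = 2 ^ (i + 1) := by ring
    rw [he] at hb
    rw [hb, psN_pow]
    cases i with
    | zero => simp [SnN_one]
    | succ j =>
      simp only [Nat.add_sub_cancel] at ih ⊢
      have hkey : (j + 1 + 1) * (j + 1) * 2 ^ (j + 1 + 1)
          = 2 * ((j + 1) * j * 2 ^ (j + 1)) + 4 * (2 ^ (j + 1) * (j + 1)) := by ring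
      rw [hkey]
      omega

-- CnN (2^(i+1)) and SnN (2^(i+1)) in the shape A's loop uses
lemma Cn_pow_eq (i : Nat) : CnN (2 ^ (i + 1)) = (i + 1) * 2 ^ i := by
  have h := Cn_pow (i + 1)
  have hkey : (i + 1) * 2 ^ (i + 1) = 2 * ((i + 1) * 2 ^ i) := by ring
  rw [hkey] at h
  omega

lemma Sn_pow_eq (i : Nat) : SnN (2 ^ (i + 1)) = (i + 1) * i / 2 * 2 ^ i := by
  have h := Sn_pow (i + 1)
  simp only [Nat.add_sub_cancel] at h
  obtain ⟨r, hr⟩ : 2 ∣ (i + 1) * i := by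
    have he : Even (i * (i + 1)) := Nat.even_mul_succ_self i
    rw [mul_comm] at he
    exact he.two_dvd
  have hr2 : (i + 1) * i / 2 = r := by omega
  have hkey : (i + 1) * i * 2 ^ (i + 1) = 4 * (r * 2 ^ i) := by rw [hr]; ring
  rw [hkey] at h
  rw [hr2]
  omega

-- ---- bitwise helpers ----
lemma or_pow_of_dvd : ∀ (i x : Nat), 2 ^ (i + 1) ∣ x → x ||| 2 ^ i = x + 2 ^ i := by
  intro i
  induction i with
  | zero =>
    intro x hx
    obtain ⟨a, rfl⟩ := hx
    have h1 : (2 ^ (0 + 1) * a ||| 2 ^ 0) % 2 = 1 := by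
      rw [Nat.or_mod_two_eq_one]
      right; rfl
    have h2 : (2 ^ (0 + 1) * a ||| 2 ^ 0) / 2 = a := by
      rw [Nat.or_div_two]
      have ha : 2 ^ (0 + 1) * a / 2 = a := by omega
      have hb : 2 ^ 0 / 2 = 0 := by norm_num
      rw [ha, hb]
      simp
    have h3 := Nat.div_add_mod (2 ^ (0 + 1) * a ||| 2 ^ 0) 2
    omega
  | succ i ih =>
    intro x hx
    obtain ⟨a, rfl⟩ := hx
    have h1 : (2 ^ (i + 1 + 1) * a ||| 2 ^ (i + 1)) % 2 = 0 := by
      have hne : ¬ ((2 ^ (i + 1 + 1) * a ||| 2 ^ (i + 1)) % 2 = 1) := by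
        rw [Nat.or_mod_two_eq_one]
        rintro (hc | hc)
        · have : (2:Nat) ^ (i + 1 + 1) * a = 2 * (2 ^ (i + 1) * a) := by ring
          omega
        · have : (2:Nat) ^ (i + 1) = 2 * 2 ^ i := by ring
          omega
      omega
    have h2 : (2 ^ (i + 1 + 1) * a ||| 2 ^ (i + 1)) / 2
        = 2 ^ (i + 1) * a + 2 ^ i := by
      rw [Nat.or_div_two]
      have ha : 2 ^ (i + 1 + 1) * a / 2 = 2 ^ (i + 1) * a := by
        have : (2:Nat) ^ (i + 1 + 1) * a = 2 * (2 ^ (i + 1) * a) := by ring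
        omega
      have hb : (2:Nat) ^ (i + 1) / 2 = 2 ^ i := by
        have : (2:Nat) ^ (i + 1) = 2 * 2 ^ i := by ring
        omega
      rw [ha, hb]
      exact ih _ ⟨a, rfl⟩
    have h3 := Nat.div_add_mod (2 ^ (i + 1 + 1) * a ||| 2 ^ (i + 1)) 2
    have e1 : (2:Nat) ^ (i + 1 + 1) * a = 2 * (2 ^ (i + 1) * a) := by ring
    have e2 : (2:Nat) ^ (i + 1) = 2 * 2 ^ i := by ring
    omega

lemma and_pred_odd (m : Nat) (h : m % 2 = 1) : m &&& (m - 1) = m - 1 := by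
  have h1 : (m &&& (m - 1)) % 2 = 0 := by
    have : ¬ ((m &&& (m - 1)) % 2 = 1) := by
      rw [Nat.and_mod_two_eq_one]
      omega
    omega
  have h2 : (m &&& (m - 1)) / 2 = m / 2 := by
    rw [Nat.and_div_two]
    have : (m - 1) / 2 = m / 2 := by omega
    rw [this, Nat.and_self]
  have h3 := Nat.div_add_mod (m &&& (m - 1)) 2
  omega

lemma and_pred_even (a : Nat) (h : 0 < a) : 2 * a &&& (2 * a - 1) = 2 * (a &&& (a - 1)) := by
  have h1 : (2 * a &&& (2 * a - 1)) % 2 = 0 := by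
    have : ¬ ((2 * a &&& (2 * a - 1)) % 2 = 1) := by
      rw [Nat.and_mod_two_eq_one]
      omega
    omega
  have h2 : (2 * a &&& (2 * a - 1)) / 2 = a &&& (a - 1) := by
    rw [Nat.and_div_two]
    have ha : 2 * a / 2 = a := by omega
    have hb : (2 * a - 1) / 2 = a - 1 := by omega
    rw [ha, hb]
  have h3 := Nat.div_add_mod (2 * a &&& (2 * a - 1)) 2
  omega

lemma xor_one_odd (m : Nat) (h : m % 2 = 1) : m ^^^ 1 = m - 1 := by
  have h1 : (m ^^^ 1) % 2 = 0 := by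
    have : ¬ ((m ^^^ 1) % 2 = 1) := by
      rw [Nat.xor_mod_two_eq_one]
      omega
    omega
  have h2 : (m ^^^ 1) / 2 = m / 2 := by
    rw [Nat.xor_div_two]
    norm_num
  have h3 := Nat.div_add_mod (m ^^^ 1) 2
  omega

lemma xor_two_mul (a b : Nat) : 2 * a ^^^ 2 * b = 2 * (a ^^^ b) := by
  have h1 : (2 * a ^^^ 2 * b) % 2 = 0 := by
    have : ¬ ((2 * a ^^^ 2 * b) % 2 = 1) := by
      rw [Nat.xor_mod_two_eq_one]
      omega
    omega
  have h2 : (2 * a ^^^ 2 * b) / 2 = a ^^^ b := by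
    rw [Nat.xor_div_two]
    have ha : 2 * a / 2 = a := by omega
    have hb : 2 * b / 2 = b := by omega
    rw [ha, hb]
  have h3 := Nat.div_add_mod (2 * a ^^^ 2 * b) 2
  omega

lemma lbN_odd (m : Nat) (h : m % 2 = 1) : lbN m = 1 := by
  unfold lbN
  rw [and_pred_odd m h]
  omega

lemma lbN_even (a : Nat) (h : 0 < a) : lbN (2 * a) = 2 * lbN a := by
  unfold lbN
  rw [and_pred_even a h]
  have : a &&& (a - 1) ≤ a := Nat.and_le_left
  omega

lemma lowbit_step : ∀ m, 0 < m →
    ∃ p t, ebits m = p :: t ∧ lbN m = 2 ^ p ∧ ebits (m ^^^ 2 ^ p) = t := by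
  intro m
  induction m using Nat.strong_induction_on with
  | _ m ih =>
    intro hm
    obtain ⟨c, rfl | rfl⟩ := Nat.even_or_odd' m
    · have hc : 0 < c := by omega
      obtain ⟨p, t, h1, h2, h3⟩ := ih c (by omega) hc
      refine ⟨p + 1, t.map (· + 1), ?_, ?_, ?_⟩
      · rw [ebits_two_mul, h1]; rfl
      · rw [lbN_even c hc, h2]; ring
      · have hx : 2 * c ^^^ 2 ^ (p + 1) = 2 * (c ^^^ 2 ^ p) := by
          have : (2:Nat) ^ (p + 1) = 2 * 2 ^ p := by ring
          rw [this, xor_two_mul]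
        rw [hx, ebits_two_mul, h3]
    · refine ⟨0, (ebits c).map (· + 1), ebits_odd c, lbN_odd _ (by omega), ?_⟩
      have hx : 2 * c + 1 ^^^ 2 ^ 0 = 2 * c := by
        have := xor_one_odd (2 * c + 1) (by omega)
        simpa using this
      rw [hx, ebits_two_mul]

-- ---- PySem bit-level bridges ----
lemma intCast_shiftLeft (m s : Nat) : ((m : Int) <<< s) = ((m <<< s : Nat) : Int) := rfl
lemma intCast_shiftRight (m s : Nat) : ((m : Int) >>> s) = ((m >>> s : Nat) : Int) := rfl

lemma bitLength_pow (p : Nat) : PySem.Int.bitLength ((2 ^ p : Nat) : Int) = p + 1 := by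
  induction p with
  | zero =>
    rw [PySem.Int.bitLength_natCast (by norm_num)]
    norm_num
  | succ p ih =>
    rw [PySem.Int.bitLength_natCast (by positivity)]
    have : (2:Nat) ^ (p + 1) / 2 = 2 ^ p := by
      have : (2:Nat) ^ (p + 1) = 2 * 2 ^ p := by ring
      omega
    rw [this, ih]

lemma band_lowbit (m : Nat) (h : 0 < m) :
    PySem.Int.band (m : Int) (-(m : Int)) = ((lbN m : Nat) : Int) := by
  simp only [PySem.Int.band]
  rw [if_pos (by positivity), if_neg (by omega)]
  have h1 : (-(-(m : Int)) - 1).toNat = m - 1 := by omega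
  have h2 : ((m : Int)).toNat = m := by omega
  rw [h1, h2]
  unfold lbN
  congr 1

-- ---- A's tail loop ----
lemma foldl_ignore {α : Type} (f : α → Int → α) (g : α → α) (h : ∀ a x, f a x = g a) :
    ∀ (l : List Int) (st : α), l.foldl f st = g^[l.length] st := by
  intro l
  induction l with
  | nil => intro st; rfl
  | cons a tl ih =>
    intro st
    rw [List.foldl_cons, ih, h, List.length_cons, Function.iterate_succ_apply]

lemma tail_iterate : ∀ (t m : Nat) (res : Int), t ≤ pcN m →
    ∃ m' : Nat, (fun st => pvLoopTail st 0)^[t] (res, (m : Int))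
      = (res + ((((ebits m).take t).sum : Nat) : Int), (m' : Int)) := by
  intro t
  induction t with
  | zero => intro m res _; exact ⟨m, by simp⟩
  | succ t ih =>
    intro m res ht
    have hm : 0 < m := by
      by_contra h
      have : m = 0 := by omega
      subst this
      simp [pcN_zero] at ht
    obtain ⟨p, tl, h1, h2, h3⟩ := lowbit_step m hm
    have hstep : pvLoopTail (res, (m : Int)) 0 = (res + (p : Int), ((m ^^^ 2 ^ p : Nat) : Int)) := by
      simp only [pvLoopTail]
      rw [band_lowbit m hm, h2, bitLength_pow, PySem.Int.bxor_natCast]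
      have hcast : (((p + 1 : Nat)) : Int) - 1 = (p : Int) := by push_cast; ring
      rw [hcast]
    have htl : t ≤ pcN (m ^^^ 2 ^ p) := by
      have hlen : pcN m = pcN (m ^^^ 2 ^ p) + 1 := by
        simp [pcN, h1, h3]
      omega
    obtain ⟨m', hm'⟩ := ih (m ^^^ 2 ^ p) (res + (p : Int)) htl
    refine ⟨m', ?_⟩
    rw [Function.iterate_succ_apply, hstep, hm', h1, h3]
    refine Prod.ext ?_ rfl
    simp [List.take_succ_cons]
    ring

-- ---- A's main loop ----
lemma main_loop : ∀ (i : Nat), ∀ (k n : Nat), 2 ^ (i + 1) ∣ n → CnN n ≤ k → k < CnN (n + 2 ^ (i + 1)) →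
    ∃ n', 2 ∣ n' ∧ CnN n' ≤ k ∧ k < CnN (n' + 2) ∧
      (PySem.List.pyRange (i : Int) 0 (-1)).foldl pvLoopMain
        (((k - CnN n : Nat) : Int), ((SnN n : Nat) : Int), ((n : Nat) : Int),
          ((pcN n : Nat) : Int), ((psN n : Nat) : Int))
      = (((k - CnN n' : Nat) : Int), ((SnN n' : Nat) : Int), ((n' : Nat) : Int),
          ((pcN n' : Nat) : Int), ((psN n' : Nat) : Int)) := by
  intro i
  induction i with
  | zero =>
    intro k n h1 h2 h3
    refine ⟨n, by simpa using h1, h2, by simpa using h3, ?_⟩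
    rw [show ((0 : Nat) : Int) = 0 by rfl, PySem.List.pyRange_neg_one_eq_nil le_rfl]
    rfl
  | succ i ih =>
    intro k n hdvd hle hlt
    have hcons : PySem.List.pyRange ((i + 1 : Nat) : Int) 0 (-1)
        = ((i + 1 : Nat) : Int) :: PySem.List.pyRange ((i : Nat) : Int) 0 (-1) := by
      rw [PySem.List.pyRange_neg_one_cons (by positivity)]
      congr 1
      push_cast
      ring
    rw [hcons, List.foldl_cons]
    have hdvd1 : 2 ^ (i + 1) ∣ n := dvd_trans (pow_dvd_pow 2 (by omega)) hdvd
    have hblockC := (Cn_Sn_block (i + 1) n hdvd1).1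
    have hblockS := (Cn_Sn_block (i + 1) n hdvd1).2
    -- evaluate the loop body on the canonical state
    have htoNat1 : (((i + 1 : Nat) : Int)).toNat = i + 1 := by omega
    have htoNat2 : (((i + 1 : Nat) : Int) - 1).toNat = i := by omega
    have hcval : ((pcN n : Nat) : Int) <<< (((i + 1 : Nat) : Int)).toNat
        + ((i + 1 : Nat) : Int) <<< ((((i + 1 : Nat) : Int)) - 1).toNat
        = (((2 ^ (i + 1) * pcN n + CnN (2 ^ (i + 1)) : Nat)) : Int) := by
      rw [htoNat1, htoNat2, intCast_shiftLeft, intCast_shiftLeft, Cn_pow_eq]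
      push_cast [Nat.shiftLeft_eq]
      ring
    by_cases hbr : CnN (n + 2 ^ (i + 1)) ≤ k
    · -- branch taken: set bit i+1
      set n2 := n + 2 ^ (i + 1) with hn2
      obtain ⟨a, ha⟩ := hdvd
      have hpc2 : pcN n2 = pcN n + 1 ∧ psN n2 = psN n + (i + 1) := by
        have hsplitb := split_pc_ps (i + 2) a (2 ^ (i + 1))
          (by have h2e : (2:Nat) ^ (i + 2) = 2 * 2 ^ (i + 1) := by ring
              have hp : 0 < (2:Nat) ^ (i + 1) := by positivity
              omega)
        have hsplit0 := split_pc_ps (i + 2) a 0 (Nat.two_pow_pos (i + 2))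
        have e1 : 2 ^ (i + 2) * a + 2 ^ (i + 1) = n2 := by rw [hn2, ha]
        have e0 : 2 ^ (i + 2) * a + 0 = n := by rw [ha]; ring
        rw [e1] at hsplitb
        rw [e0] at hsplit0
        obtain ⟨hb1, hb2⟩ := hsplitb
        obtain ⟨h01, h02⟩ := hsplit0
        rw [pcN_pow] at hb1
        rw [psN_pow] at hb2
        simp only [pcN_zero, psN_zero, Nat.add_zero] at h01 h02
        exact ⟨by omega, by omega⟩
      have hstep : pvLoopMain
          (((k - CnN n : Nat) : Int), ((SnN n : Nat) : Int), ((n : Nat) : Int),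
            ((pcN n : Nat) : Int), ((psN n : Nat) : Int)) ((i + 1 : Nat) : Int)
          = (((k - CnN n2 : Nat) : Int), ((SnN n2 : Nat) : Int), ((n2 : Nat) : Int),
            ((pcN n2 : Nat) : Int), ((psN n2 : Nat) : Int)) := by
        simp only [pvLoopMain]
        rw [hcval]
        rw [if_pos (by omega)]
        refine Prod.ext ?_ (Prod.ext ?_ (Prod.ext ?_ (Prod.ext ?_ ?_))) <;> simp only
        · omega
        · -- res component
          rw [htoNat1, htoNat2, intCast_shiftLeft]
          have hff : PySem.Int.floordiv (((i + 1 : Nat) : Int) * (((i + 1 : Nat) : Int) - 1)) 2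
              = (((i + 1) * i / 2 : Nat) : Int) := by
            have e : ((i + 1 : Nat) : Int) * (((i + 1 : Nat) : Int) - 1)
                = (((i + 1) * i : Nat) : Int) := by push_cast; ring
            rw [e]
            exact_mod_cast PySem.Int.floordiv_natCast ((i + 1) * i) 2
          rw [hff, intCast_shiftLeft]
          have : SnN n2 = SnN n + psN n * 2 ^ (i + 1) + (i + 1) * i / 2 * 2 ^ i := by
            rw [hblockS, Sn_pow_eq]
            ring
          rw [this]
          push_cast [Nat.shiftLeft_eq]
          ring
        · -- n component
          rw [htoNat1, PySem.Int.bor_natCast]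
          have h1s : (1 : Nat) <<< (i + 1) = 2 ^ (i + 1) := by
            rw [Nat.shiftLeft_eq]; ring
          rw [h1s]
          rw [or_pow_of_dvd (i + 1) n ⟨a, ha⟩]
        · rw [hpc2.1]; push_cast; ring
        · rw [hpc2.2]; push_cast; ring
      rw [hstep]
      apply ih k n2
      · exact ⟨2 * a + 1, by rw [hn2, ha]; ring⟩
      · omega
      · have : n2 + 2 ^ (i + 1) = n + 2 ^ (i + 1 + 1) := by rw [hn2]; ring
        rw [this]
        exact hlt
    · -- branch not taken
      have hstep : pvLoopMain
          (((k - CnN n : Nat) : Int), ((SnN n : Nat) : Int), ((n : Nat) : Int),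
            ((pcN n : Nat) : Int), ((psN n : Nat) : Int)) ((i + 1 : Nat) : Int)
          = (((k - CnN n : Nat) : Int), ((SnN n : Nat) : Int), ((n : Nat) : Int),
            ((pcN n : Nat) : Int), ((psN n : Nat) : Int)) := by
        simp only [pvLoopMain]
        rw [hcval]
        rw [if_neg (by omega)]
      rw [hstep]
      exact ih k n hdvd1 hle (by omega)

lemma tail_foldl' (bi : Nat) (res : Int) (m : Nat) (h : bi ≤ pcN m) :
    ∃ z : Int, (PySem.List.pyRange 0 (bi : Int) 1).foldl pvLoopTail (res, (m : Int))
      = (res + ((((ebits m).take bi).sum : Nat) : Int), z) := by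
  rw [foldl_ignore pvLoopTail (fun st => pvLoopTail st 0) (fun a x => rfl)]
  have hl : (PySem.List.pyRange 0 (bi : Int) 1).length = bi := by
    rw [PySem.List.length_pyRange_one]
    omega
  rw [hl]
  obtain ⟨m', hm'⟩ := tail_iterate bi m res h
  exact ⟨(m' : Int), hm'⟩

-- ---- A on positive inputs ----
lemma A_pos (k : Nat) (hk : 0 < k) :
    ∃ w, CnN w ≤ k ∧ k ≤ CnN w + pcN w ∧
      bitIndexPreSumFast (k : Int) =
        ((SnN w + ((ebits w).take (k - CnN w)).sum : Nat) : Int) := by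
  have harg : ((k : Int) + 1) = ((k + 1 : Nat) : Int) := by push_cast; ring
  set L := PySem.Int.bitLength ((k + 1 : Nat) : Int) with hLdef
  have hlt : k + 1 < 2 ^ L := by
    have := PySem.Int.lt_two_pow_bitLength ((k + 1 : Nat) : Int)
    simpa using this
  have hL2 : 2 ≤ L := by
    by_contra hc
    have hle : L ≤ 1 := by omega
    have : (2:Nat) ^ L ≤ 2 ^ 1 := Nat.pow_le_pow_right (by norm_num) hle
    omega
  set Lk := L - 1 with hLkdef
  have hLeq : L = Lk + 1 := by omega
  rw [hLeq] at hlt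
  have hstart : k < CnN (0 + 2 ^ (Lk + 1)) := by
    have hcp : CnN (2 ^ (Lk + 1)) = (Lk + 1) * 2 ^ Lk := Cn_pow_eq Lk
    have hmul : 2 * 2 ^ Lk ≤ (Lk + 1) * 2 ^ Lk :=
      Nat.mul_le_mul_right _ (by omega)
    have hpow : (2:Nat) ^ (Lk + 1) = 2 * 2 ^ Lk := by ring
    rw [Nat.zero_add, hcp]
    omega
  obtain ⟨n', hd2, hc1, hc2, hfold⟩ :=
    main_loop Lk k 0 (Dvd.intro 0 rfl) (by simp [CnN_zero]) hstart
  have hinit : (((k : Nat) : Int), (0 : Int), (0 : Int), (0 : Int), (0 : Int))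
      = (((k - CnN 0 : Nat) : Int), ((SnN 0 : Nat) : Int), (((0 : Nat) : Nat) : Int),
          ((pcN 0 : Nat) : Int), ((psN 0 : Nat) : Int)) := by
    simp [CnN_zero, SnN_zero, pcN_zero, psN_zero]
  have hrange : ((L : Int) - 1) = ((Lk : Nat) : Int) := by omega
  simp only [bitIndexPreSumFast]
  rw [if_neg (by simp; omega)]
  rw [harg, ← hLdef, hrange, hinit, hfold]
  simp only
  by_cases hbr : CnN (n' + 1) ≤ k
  · have hcs : CnN (n' + 1) = CnN n' + pcN n' := CnN_succ n'
    rw [if_pos (by omega : ((pcN n' : Nat) : Int) ≤ ((k - CnN n' : Nat) : Int))]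
    simp only
    have e1 : ((k - CnN n' : Nat) : Int) - ((pcN n' : Nat) : Int)
        = ((k - CnN (n' + 1) : Nat) : Int) := by omega
    have e2 : ((SnN n' : Nat) : Int) + ((psN n' : Nat) : Int)
        = ((SnN (n' + 1) : Nat) : Int) := by
      rw [SnN_succ]; push_cast; ring
    have e3 : ((n' : Nat) : Int) + 1 = (((n' + 1 : Nat)) : Int) := by push_cast; ring
    rw [e1, e2, e3]
    have hcs2 : CnN (n' + 2) = CnN (n' + 1) + pcN (n' + 1) := by
      have h := CnN_succ (n' + 1)
      rw [show n' + 1 + 1 = n' + 2 by omega] at h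
      exact h
    have ht : k - CnN (n' + 1) ≤ pcN (n' + 1) := by omega
    obtain ⟨z, hz⟩ := tail_foldl' (k - CnN (n' + 1)) _ (n' + 1) ht
    rw [hz]
    refine ⟨n' + 1, hbr, ?_, ?_⟩
    · omega
    · simp only
      push_cast
      ring
  · rw [if_neg (by
      have hcs : CnN (n' + 1) = CnN n' + pcN n' := CnN_succ n'
      omega : ¬ ((pcN n' : Nat) : Int) ≤ ((k - CnN n' : Nat) : Int))]
    simp only
    have ht : k - CnN n' ≤ pcN n' := by
      have hcs : CnN (n' + 1) = CnN n' + pcN n' := CnN_succ n'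
      omega
    obtain ⟨z, hz⟩ := tail_foldl' (k - CnN n') _ n' ht
    rw [hz]
    refine ⟨n', hc1, ?_, ?_⟩
    · have hcs : CnN (n' + 1) = CnN n' + pcN n' := CnN_succ n'
      omega
    · simp only
      push_cast
      ring

-- ---- A on negative inputs ----
lemma neg_loop (z : Int) (hz : z < 0) :
    ∀ l : List Int, (∀ x ∈ l, 0 < x) → l.foldl pvLoopMain (z, 0, 0, 0, 0) = (z, 0, 0, 0, 0) := by
  intro l
  induction l with
  | nil => intro _; rfl
  | cons a tl ih =>
    intro hmem
    have ha : 0 < a := hmem a List.mem_cons_self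
    have hstep : pvLoopMain (z, 0, 0, 0, 0) a = (z, 0, 0, 0, 0) := by
      simp only [pvLoopMain]
      rw [if_neg]
      have h0 : (0 : Int) <<< a.toNat = 0 := by
        rw [show (0 : Int) = ((0 : Nat) : Int) by rfl, intCast_shiftLeft]
        simp
      have hnn : 0 ≤ a <<< (a - 1).toNat := by
        rw [show a = ((a.toNat : Nat) : Int) by omega, intCast_shiftLeft]
        positivity
      omega
    rw [List.foldl_cons, hstep]
    exact ih (fun x hx => hmem x (List.mem_cons_of_mem a hx))

lemma A_neg (z : Int) (hz : z < 0) : bitIndexPreSumFast z = 0 := by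
  simp only [bitIndexPreSumFast]
  rw [if_neg (by simp; omega)]
  rw [neg_loop z hz _ (by
    intro x hx
    exact (PySem.List.mem_pyRange_neg_one.mp hx).1)]
  simp only
  rw [if_neg (by omega : ¬ (0 : Int) ≤ z)]
  simp only
  rw [PySem.List.pyRange_one_eq_nil (by omega : z ≤ 0)]
  rfl

-- ---- B-side bridges ----
lemma ebits_filter (m : Nat) :
    (List.range (PySem.Int.bitLength ((m : Nat) : Int))).filter (fun j => decide ((m >>> j) % 2 = 1))
      = ebits m := by
  induction m using Nat.strong_induction_on with
  | _ m ih =>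
    rcases Nat.eq_zero_or_pos m with rfl | hm
    · simp [ebits_zero]
    · rw [PySem.Int.bitLength_natCast hm, List.range_succ_eq_map]
      rw [List.filter_cons]
      have hshift : ∀ j : Nat, m >>> (j + 1) = (m / 2) >>> j := by
        intro j
        rw [Nat.add_comm, Nat.shiftRight_add]
        have h1 : m >>> 1 = m / 2 := by
          have := Nat.shiftRight_succ m 0
          simpa using this
        rw [h1]
      have hfm : (List.map Nat.succ (List.range (PySem.Int.bitLength ((m / 2 : Nat) : Int)))).filter
            (fun j => decide ((m >>> j) % 2 = 1))
          = ((List.range (PySem.Int.bitLength ((m / 2 : Nat) : Int))).filter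
            (fun j => decide (((m / 2) >>> j) % 2 = 1))).map Nat.succ := by
        rw [List.filter_map]
        congr 1
        apply List.filter_congr
        intro j _
        simp [Function.comp, Nat.succ_eq_add_one, hshift j]
      rw [hfm, ih (m / 2) (by omega)]
      rw [ebits_pos m (by omega)]
      have hb0 : m >>> 0 = m := rfl
      by_cases hpar : m % 2 = 1
      · rw [if_pos (by simp [hb0, hpar])]
        simp [hpar]
      · rw [if_neg (by simp [hb0, hpar])]
        simp [hpar]

-- ---- B characterization ----
lemma Bspec_eq (w k : Nat) (h1 : CnN w ≤ k) (h2 : k ≤ CnN w + pcN w) :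
    BspecN k = SnN w + ((ebits w).take (k - CnN w)).sum := by
  have hw : w ≤ k + 1 := by
    have := le_CnN_succ w
    omega
  rcases Nat.lt_or_ge k w with hlt | hge
  · -- w = k + 1 forced
    have hwe : w = k + 1 := by omega
    subst hwe
    have hck : CnN (k + 1) = k := by
      have := le_CnN_succ (k + 1)
      omega
    have ht0 : k - CnN (k + 1) = 0 := by omega
    rw [ht0]
    simp only [BspecN]
    have htk : (prefN (k + 1)).take k = prefN (k + 1) := by
      apply List.take_of_length_le
      have : (prefN (k + 1)).length = CnN (k + 1) := rfl
      omega
    rw [htk]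
    simp [SnN]
  · -- w ≤ k
    have hsplitr : List.range (k + 1) = List.range w ++ (List.range (k + 1 - w)).map (w + ·) := by
      have h : List.range (w + (k + 1 - w)) = List.range w ++ (List.range (k + 1 - w)).map (w + ·) :=
        List.range_add
      rw [show w + (k + 1 - w) = k + 1 by omega] at h
      exact h
    have hone : k + 1 - w = (k - w) + 1 := by omega
    have hpref : prefN (k + 1) = prefN w ++ (ebits w ++
        ((List.range (k - w)).map (fun b => w + Nat.succ b)).flatMap ebits) := by
      simp only [prefN]
      rw [hsplitr, List.flatMap_append]
      congr 1
      rw [hone, List.range_succ_eq_map]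
      simp only [List.map_cons, List.flatMap_cons, List.map_map]
      congr 1
    have hlenp : (prefN w).length = CnN w := rfl
    set t := k - CnN w with htdef
    have htake : (prefN (k + 1)).take k = prefN w ++ (ebits w).take t := by
      rw [hpref, show k = (prefN w).length + t by omega, List.take_length_add_append]
      rw [List.take_append_of_le_length (by
        have : (ebits w).length = pcN w := rfl
        omega)]
    rw [BspecN, htake, List.sum_append]
    rfl


-- ---- doubling recursions for CnN / SnN ----
lemma Cn_two_mul (M : Nat) : CnN (2 * M) = 2 * CnN M + M := by
  induction M with
  | zero => simp [CnN_zero]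
  | succ M ih =>
    have e : 2 * (M + 1) = 2 * M + 1 + 1 := by ring
    rw [e, CnN_succ, CnN_succ, pcN_two_mul, pcN_odd, ih, CnN_succ]
    ring

lemma Sn_two_mul (M : Nat) : SnN (2 * M) = 2 * SnN M + 2 * CnN M := by
  induction M with
  | zero => simp [SnN_zero, CnN_zero]
  | succ M ih =>
    have e : 2 * (M + 1) = 2 * M + 1 + 1 := by ring
    rw [e, SnN_succ, SnN_succ, psN_two_mul, psN_odd, ih, SnN_succ, CnN_succ]
    ring

-- ---- B's helper recursions compute pcN/psN and CnN/SnN ----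
lemma countsB_spec : ∀ (m : Nat) (c s j : Nat),
    pvCountsB ((m : Nat) : Int) (c : Int) (s : Int) (j : Int)
      = (((c + pcN m : Nat) : Int), ((s + psN m + j * pcN m : Nat) : Int)) := by
  intro m
  induction m using Nat.strong_induction_on with
  | _ m ih =>
    intro c s j
    rcases Nat.eq_zero_or_pos m with rfl | hm
    · rw [pvCountsB]
      simp [pcN_zero, psN_zero]
    · rw [pvCountsB, dif_pos (by omega : (0 : Int) < ((m : Nat) : Int))]
      have hband : PySem.Int.band ((m : Nat) : Int) 1 = (((m % 2 : Nat)) : Int) := by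
        rw [show (1 : Int) = ((1 : Nat) : Int) from rfl, PySem.Int.band_natCast,
          Nat.and_one_is_mod]
      have hsh : ((m : Nat) : Int) >>> 1 = ((m / 2 : Nat) : Int) := by
        rw [show ((m : Nat) : Int) >>> 1 = ((m >>> 1 : Nat) : Int) from rfl]
        have h2 : m >>> 1 = m / 2 := by
          have := Nat.shiftRight_succ m 0
          simpa using this
        rw [h2]
      rw [hband, hsh]
      by_cases hpar : m % 2 = 1
      · rw [if_pos (by simp [hpar])]
        simp only
        have e1 : (c : Int) + 1 = ((c + 1 : Nat) : Int) := by push_cast; ring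
        have e2 : (s : Int) + (j : Int) = ((s + j : Nat) : Int) := by push_cast; ring
        have e3 : (j : Int) + 1 = ((j + 1 : Nat) : Int) := by push_cast; ring
        rw [e1, e2, e3, ih (m / 2) (by omega) (c + 1) (s + j) (j + 1)]
        have hme : m = 2 * (m / 2) + 1 := by omega
        have hpc : pcN m = pcN (m / 2) + 1 := by
          conv_lhs => rw [hme]
          rw [pcN_odd]
        have hps : psN m = psN (m / 2) + pcN (m / 2) := by
          conv_lhs => rw [hme]
          rw [psN_odd]
        refine Prod.ext ?_ ?_ <;> simp only [hpc, hps] <;> push_cast <;> ring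
      · rw [if_neg (by
          have h0 : m % 2 = 0 := by omega
          simp [h0])]
        simp only
        have e3 : (j : Int) + 1 = ((j + 1 : Nat) : Int) := by push_cast; ring
        rw [e3, ih (m / 2) (by omega) c s (j + 1)]
        have hme : m = 2 * (m / 2) := by omega
        have hpc : pcN m = pcN (m / 2) := by
          conv_lhs => rw [hme]
          rw [pcN_two_mul]
        have hps : psN m = psN (m / 2) + pcN (m / 2) := by
          conv_lhs => rw [hme]
          rw [psN_two_mul]
        refine Prod.ext ?_ ?_ <;> simp only [hpc, hps] <;> push_cast <;> ring

lemma Cn_odd (M : Nat) : CnN (2 * M + 1) = CnN (2 * M) + pcN M := by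
  rw [CnN_succ, pcN_two_mul]

lemma Sn_odd (M : Nat) : SnN (2 * M + 1) = SnN (2 * M) + psN M + pcN M := by
  rw [SnN_succ, psN_two_mul]
  omega

lemma prefixB_spec : ∀ (n : Nat),
    pvPrefixB ((n : Nat) : Int) = (((CnN n : Nat) : Int), ((SnN n : Nat) : Int)) := by
  intro n
  induction n using Nat.strong_induction_on with
  | _ n ih =>
    rcases Nat.eq_zero_or_pos n with rfl | hn
    · rw [pvPrefixB]
      simp [CnN_zero, SnN_zero]
    · rw [pvPrefixB, dif_pos (by omega : (0 : Int) < ((n : Nat) : Int))]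
      have hfd : PySem.Int.floordiv ((n : Nat) : Int) 2 = ((n / 2 : Nat) : Int) := by
        exact_mod_cast PySem.Int.floordiv_natCast n 2
      have hmd : PySem.Int.mod ((n : Nat) : Int) 2 = ((n % 2 : Nat) : Int) := by
        exact_mod_cast PySem.Int.mod_natCast n 2
      have hcount := countsB_spec (n / 2) 0 0 0
      simp only [Nat.cast_zero, Nat.zero_add, Nat.zero_mul, Nat.add_zero] at hcount
      simp only [hfd, hmd, ih (n / 2) (by omega), hcount]
      by_cases hpar : n % 2 = 1
      · rw [if_pos (by simp [hpar])]
        have hne : n = 2 * (n / 2) + 1 := by omega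
        have hC : CnN n = 2 * CnN (n / 2) + n / 2 + pcN (n / 2) := by
          conv_lhs => rw [hne]
          rw [Cn_odd, Cn_two_mul]
        have hS : SnN n = 2 * SnN (n / 2) + 2 * CnN (n / 2) + psN (n / 2) + pcN (n / 2) := by
          conv_lhs => rw [hne]
          rw [Sn_odd, Sn_two_mul]
        refine Prod.ext ?_ ?_ <;> simp only [hC, hS] <;> push_cast <;> ring
      · rw [if_neg (by
          have h0 : n % 2 = 0 := by omega
          simp [h0])]
        have hne : n = 2 * (n / 2) := by omega
        have hC : CnN n = 2 * CnN (n / 2) + n / 2 := by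
          conv_lhs => rw [hne]
          rw [Cn_two_mul]
        have hS : SnN n = 2 * SnN (n / 2) + 2 * CnN (n / 2) := by
          conv_lhs => rw [hne]
          rw [Sn_two_mul]
        refine Prod.ext ?_ ?_ <;> simp only [hC, hS] <;> push_cast <;> ring

-- ---- binary search ----
lemma searchB_spec (k : Nat) : ∀ (d lo hi : Nat), hi - lo ≤ d → lo < hi →
    CnN lo ≤ k → k < CnN hi →
    ∃ lo' : Nat, CnN lo' ≤ k ∧ k < CnN (lo' + 1) ∧
      pvSearchB ((k : Nat) : Int) ((lo : Nat) : Int) ((hi : Nat) : Int) = ((lo' : Nat) : Int) := by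
  intro d
  induction d with
  | zero => intro lo hi hd hlt _ _; omega
  | succ d ih =>
    intro lo hi hd hlt h1 h2
    by_cases hgap : lo + 1 < hi
    · rw [pvSearchB, dif_pos (by omega : (1 : Int) < ((hi : Nat) : Int) - ((lo : Nat) : Int))]
      have hmid : PySem.Int.floordiv (((lo : Nat) : Int) + ((hi : Nat) : Int)) 2
          = (((lo + hi) / 2 : Nat) : Int) := by
        rw [show ((lo : Nat) : Int) + ((hi : Nat) : Int) = (((lo + hi : Nat)) : Int) by push_cast; ring]
        exact_mod_cast PySem.Int.floordiv_natCast (lo + hi) 2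
      simp only [hmid, prefixB_spec ((lo + hi) / 2)]
      set mid := (lo + hi) / 2 with hmiddef
      have hb1 : lo < mid := by omega
      have hb2 : mid < hi := by omega
      by_cases hc : CnN mid ≤ k
      · rw [if_pos (by exact_mod_cast hc)]
        exact ih mid hi (by omega) hb2 hc h2
      · rw [if_neg (by exact_mod_cast hc)]
        exact ih lo mid (by omega) hb1 h1 (by omega)
    · have hhi : hi = lo + 1 := by omega
      rw [pvSearchB, dif_neg (by omega : ¬ (1 : Int) < ((hi : Nat) : Int) - ((lo : Nat) : Int))]
      exact ⟨lo, h1, by rw [← hhi]; exact h2, rfl⟩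

-- ---- B's tail loop ----
lemma tailB_spec (lo : Nat) : ∀ (js : List Nat) (t res : Nat),
    t ≤ (js.filter (fun j => decide ((lo >>> j) % 2 = 1))).length →
    pvTailB ((lo : Nat) : Int) (js.map (fun (j : Nat) => (j : Int))) (res : Int) (t : Int)
      = ((res + ((js.filter (fun j => decide ((lo >>> j) % 2 = 1))).take t).sum : Nat) : Int) := by
  intro js
  induction js with
  | nil =>
    intro t res ht
    simp at ht
    subst ht
    simp [pvTailB]
  | cons j rest ih =>
    intro t res ht
    simp only [List.map_cons, pvTailB]
    rcases Nat.eq_zero_or_pos t with rfl | htp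
    · rw [if_pos (by simp)]
      simp
    · rw [if_neg (by simp; omega)]
      have htn : (((j : Nat) : Int)).toNat = j := by omega
      rw [htn, intCast_shiftRight]
      have hband : PySem.Int.band ((lo >>> j : Nat) : Int) 1 = (((lo >>> j) % 2 : Nat) : Int) := by
        rw [show (1 : Int) = ((1 : Nat) : Int) from rfl, PySem.Int.band_natCast,
          Nat.and_one_is_mod]
      rw [hband]
      by_cases hbit : (lo >>> j) % 2 = 1
      · rw [if_pos (by simp [hbit])]
        rw [List.filter_cons_of_pos (by simp only [decide_eq_true_eq]; exact hbit)] at ht ⊢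
        have e1 : (res : Int) + ((j : Nat) : Int) = ((res + j : Nat) : Int) := by push_cast; ring
        have e2 : ((t : Nat) : Int) - 1 = ((t - 1 : Nat) : Int) := by omega
        rw [e1, e2, ih (t - 1) (res + j) (by simp at ht ⊢; omega)]
        have e4 : (j :: List.filter (fun i => decide ((lo >>> i) % 2 = 1)) rest).take t
            = j :: (List.filter (fun i => decide ((lo >>> i) % 2 = 1)) rest).take (t - 1) := by
          obtain ⟨d, hd⟩ : ∃ d, t = d + 1 := ⟨t - 1, by omega⟩
          rw [hd, List.take_succ_cons]
          norm_num
        rw [e4]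
        simp only [List.sum_cons]
        congr 1
        omega
      · rw [if_neg (by
          have h0 : (lo >>> j) % 2 = 0 := by omega
          simp [h0])]
        rw [List.filter_cons_of_neg (by simp only [decide_eq_true_eq]; exact hbit)] at ht ⊢
        exact ih t res ht

-- ---- B on positive inputs ----
lemma B_pos (k : Nat) (hk : 0 < k) : bitIndexPreSumFast_alt ((k : Nat) : Int) = ((BspecN k : Nat) : Int) := by
  simp only [bitIndexPreSumFast_alt]
  rw [if_neg (by omega : ¬ ((k : Nat) : Int) ≤ 0)]
  have harg : ((k : Int) + 1) = ((k + 1 : Nat) : Int) := by push_cast; ring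
  rw [harg]
  set L := PySem.Int.bitLength ((k + 1 : Nat) : Int) with hLdef
  have hlt : k + 1 < 2 ^ L := by
    have := PySem.Int.lt_two_pow_bitLength ((k + 1 : Nat) : Int)
    simpa using this
  have hL2 : 2 ≤ L := by
    by_contra hc
    have hle : L ≤ 1 := by omega
    have : (2:Nat) ^ L ≤ 2 ^ 1 := Nat.pow_le_pow_right (by norm_num) hle
    omega
  have hhi : (1 : Int) <<< L = ((2 ^ L : Nat) : Int) := by
    rw [show (1 : Int) = ((1 : Nat) : Int) from rfl, intCast_shiftLeft]
    congr 1
    rw [Nat.shiftLeft_eq]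
    ring
  rw [hhi]
  have hkC : k < CnN (2 ^ L) := by
    obtain ⟨Lk, hLk⟩ : ∃ Lk, L = Lk + 1 := ⟨L - 1, by omega⟩
    rw [hLk, Cn_pow_eq]
    have hmul : 2 * 2 ^ Lk ≤ (Lk + 1) * 2 ^ Lk :=
      Nat.mul_le_mul_right _ (by omega)
    have hpow : (2:Nat) ^ (Lk + 1) = 2 * 2 ^ Lk := by ring
    rw [hLk, hpow] at hlt
    omega
  obtain ⟨lo, hlo1, hlo2, hsearch⟩ := searchB_spec k (2 ^ L) 0 (2 ^ L)
    (by omega) (by positivity) (by simp [CnN_zero]) hkC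
  rw [show (((0 : Nat) : Int)) = (0 : Int) from by simp] at hsearch
  rw [hsearch, prefixB_spec lo]
  simp only
  have ht : k - CnN lo ≤ pcN lo := by
    have hcs : CnN (lo + 1) = CnN lo + pcN lo := CnN_succ lo
    omega
  have e1 : ((k : Nat) : Int) - ((CnN lo : Nat) : Int) = ((k - CnN lo : Nat) : Int) := by omega
  rw [e1, PySem.List.pyRange_zero_nat (PySem.Int.bitLength ((lo : Nat) : Int))]
  have htl := tailB_spec lo (List.range (PySem.Int.bitLength ((lo : Nat) : Int))) (k - CnN lo) (SnN lo)
  rw [ebits_filter lo] at htl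
  rw [htl (by
    have : (ebits lo).length = pcN lo := rfl
    omega)]
  rw [Bspec_eq lo k hlo1 (by
    have hcs : CnN (lo + 1) = CnN lo + pcN lo := CnN_succ lo
    omega)]

lemma B_nonpos (z : Int) (hz : z ≤ 0) : bitIndexPreSumFast_alt z = 0 := by
  simp only [bitIndexPreSumFast_alt]
  rw [if_pos hz]

-- ===== VERDICT (by name: the statement is the Claim_ definition above) =====
theorem bitIndexPreSumFast_spec : Claim_equal_bitIndexPreSumFast := by
  intro bitIndex _
  unfold Spec_bitIndexPreSumFast
  cases bitIndex with
  | ofNat n =>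
    rcases Nat.eq_zero_or_pos n with rfl | hn
    · rfl
    · obtain ⟨w, hw1, hw2, hA⟩ := A_pos n hn
      rw [show Int.ofNat n = ((n : Nat) : Int) from rfl] at *
      rw [hA, B_pos n hn, Bspec_eq w n hw1 hw2]
  | negSucc n =>
    have hz : Int.negSucc n < 0 := Int.negSucc_lt_zero n
    rw [A_neg _ hz, B_nonpos _ (by omega)]
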